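-- pv_equiv track=rewrite | github.com/VishwanthBarma/ConnectFour | ConnectFour/src/Connect4.py | place_in_order
-- ===== SOURCE A (Python) =====
-- def place_in_order(choice, coin_place, cols, board):
--     """To place the coin(Choice) in the proper slot according to the rules
--     choice -> O/X placing that coin int the board
--     coin_place -> place of the coin that is chosen by the user (player1/player2)
--     columns -> reference for the no.of columns in the board
--     board -> board of the game
--     <--Returns the Slot of Placed Coin [row, column]-->
--     """
--     ind = coin_place - 1
--     for i in range(cols):
--         a = (cols - 1) - i
--         if board[a][ind] == "  -  ":
--             board[a][ind] = "  " + str(choice) + "  "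
--             return [int(a), int(ind)]  # Returning the row and column number of the slot
--         else:
--             continue
-- ===== SOURCE B (Python) =====
-- def place_in_order(choice, coin_place, cols, board):
--     ind = coin_place - 1
--     # phase 1: collect every empty row index of the column
--     empties = [r for r in range(cols) if board[r][ind] == "  -  "]
--     if empties:
--         # phase 2: the lowest empty slot is the largest such row index
--         a = max(empties)
--         board[a][ind] = "  " + str(choice) + "  "
--         return [int(a), int(ind)]
-- ===== Notes on version B (the rewrite author's own statement) =====
-- stated objective: simpler
-- what changed: A scans the column bottom-up with an early-return loop; B first collects all empty row indices of the column in one comprehension and then separately picks the maximum of that candidate set as the slot (mutating only that cell), falling through to None when the set is empty.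
-- outside the precondition, e.g. on place_in_order('X', 1, 2, [[], ['  -  ']]): A returns [1, 0], B raises IndexError
import Mathlib
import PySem

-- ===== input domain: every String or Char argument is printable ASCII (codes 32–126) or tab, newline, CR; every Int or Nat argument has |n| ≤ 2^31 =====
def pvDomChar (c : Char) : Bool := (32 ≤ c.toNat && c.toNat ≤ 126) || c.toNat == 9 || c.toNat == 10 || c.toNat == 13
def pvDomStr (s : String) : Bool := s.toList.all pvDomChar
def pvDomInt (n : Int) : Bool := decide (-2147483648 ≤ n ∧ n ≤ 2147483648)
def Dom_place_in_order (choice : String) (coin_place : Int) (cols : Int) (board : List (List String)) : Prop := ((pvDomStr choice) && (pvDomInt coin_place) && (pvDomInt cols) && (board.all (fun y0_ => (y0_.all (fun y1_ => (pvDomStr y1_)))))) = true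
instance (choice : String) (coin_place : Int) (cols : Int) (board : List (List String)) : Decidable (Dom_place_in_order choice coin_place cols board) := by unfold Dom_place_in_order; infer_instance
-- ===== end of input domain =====

-- B replaces A's bottom-up early-return scan by a two-phase decomposition (collect all
-- empty row indices of the column, then take the maximum); equivalence is about the
-- RETURN value only — both Pythons mutate the chosen board cell in place identically.


-- ===== PORT A =====
-- A's loop over `range(cols)`: a = (cols-1)-i, check board[a][ind], early return.
-- A failing index lookup (Python IndexError) is `none` here; Pre_ excludes those inputs.
def pvGoA (ind : Int) (cols : Int) (board : List (List String)) : List Int → Option (List Int)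
  | [] => none
  | i :: rest =>
    let a := cols - 1 - i
    match PySem.List.pyGet? board a with
    | none => none
    | some row =>
      match PySem.List.pyGet? row ind with
      | none => none
      | some cell =>
        if cell == "  -  " then some [a, ind] else pvGoA ind cols board rest

def place_in_order (choice : String) (coin_place : Int) (cols : Int) (board : List (List String)) : Option (List Int) :=
  let ind := coin_place - 1
  pvGoA ind cols board (PySem.List.pyRange 0 cols 1)

-- ===== PORT B =====
def place_in_order_alt (choice : String) (coin_place : Int) (cols : Int) (board : List (List String)) : Option (List Int) :=
  let ind := coin_place - 1
  let empties := (PySem.List.pyRange 0 cols 1).filter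
      (fun r => ((PySem.List.pyGet? board r).bind (fun row => PySem.List.pyGet? row ind)) == some "  -  ")
  match PySem.List.max? empties (fun y => y) with
  | some a => some [a, ind]
  | none => none

-- ===== PRECONDITION & SPEC =====
-- Pre_ excludes inputs on which Python A raises IndexError (cols exceeding the number of
-- rows, or a scanned row whose length does not admit index coin_place-1), and — see the
-- cite — ragged boards where a row above the first bottom-up match lacks the column: there
-- A returns early but B itself raises IndexError while collecting candidates.
def Pre_place_in_order (choice : String) (coin_place : Int) (cols : Int) (board : List (List String)) : Prop :=
  cols ≤ (board.length : Int) ∧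
  ∀ row ∈ board.take cols.toNat, -(row.length : Int) ≤ coin_place - 1 ∧ coin_place - 1 < (row.length : Int)
instance (choice : String) (coin_place : Int) (cols : Int) (board : List (List String)) : Decidable (Pre_place_in_order choice coin_place cols board) := by unfold Pre_place_in_order; infer_instance

def pvWitness_place_in_order : String × Int × Int × List (List String) :=
  ("X", 1, 2, [["  X  "], ["  -  "]])

def Spec_place_in_order (choice : String) (coin_place : Int) (cols : Int) (board : List (List String)) (out : Option (List Int)) : Prop := out = place_in_order_alt choice coin_place cols board
instance (choice : String) (coin_place : Int) (cols : Int) (board : List (List String)) (out : Option (List Int)) : Decidable (Spec_place_in_order choice coin_place cols board out) := by unfold Spec_place_in_order; infer_instance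

-- ===== CLAIM (what is proved, stated in full; the proofs are below) =====
def Claim_equal_place_in_order : Prop := ∀ (choice : String) (coin_place : Int) (cols : Int) (board : List (List String)), Dom_place_in_order choice coin_place cols board → Pre_place_in_order choice coin_place cols board → Spec_place_in_order choice coin_place cols board (place_in_order choice coin_place cols board)

-- ===== LEMMAS AND PROOFS =====

-- the column predicate both programs test
def pvQ (ind : Int) (board : List (List String)) (r : Int) : Bool :=
  ((PySem.List.pyGet? board r).bind (fun row => PySem.List.pyGet? row ind)) == some "  -  "

-- reference scan: check rows m-1, m-2, ..., 0 in that order, return the first hit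
def pvSpecF (ind : Int) (board : List (List String)) : Nat → Option Int
  | 0 => none
  | n + 1 => if pvQ ind board (n : Int) then some (n : Int) else pvSpecF ind board n

-- under Pre_, every scanned lookup succeeds
theorem pvPre_lookup (coin_place cols : Int) (board : List (List String))
    (hlen : cols ≤ (board.length : Int))
    (hrows : ∀ row ∈ board.take cols.toNat,
      -(row.length : Int) ≤ coin_place - 1 ∧ coin_place - 1 < (row.length : Int))
    (a : Int) (h0 : 0 ≤ a) (h1 : a < cols) :
    ∃ row cell, PySem.List.pyGet? board a = some row ∧
      PySem.List.pyGet? row (coin_place - 1) = some cell := by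
  have hlt : a < (board.length : Int) := lt_of_lt_of_le h1 hlen
  have hrow : PySem.List.pyGet? board a = some (board[a.toNat]'(by omega)) :=
    PySem.List.pyGet?_eq_some_getElem board h0 hlt
  have hmem : board[a.toNat]'(by omega) ∈ board.take cols.toNat := by
    have h3 : a.toNat < (board.take cols.toNat).length := by simp; omega
    have h4 := List.getElem_mem h3
    rwa [List.getElem_take] at h4
  obtain ⟨hb1, hb2⟩ := hrows _ hmem
  rcases hcell : PySem.List.pyGet? (board[a.toNat]'(by omega)) (coin_place - 1) with _ | cell
  · rw [PySem.List.pyGet?_eq_none_iff] at hcell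
    exact absurd (by simp [PySem.Raise.InRange]; omega) hcell
  · exact ⟨_, cell, hrow, hcell⟩

-- A-side: the bottom-up loop over pyRange (cols-m) cols 1 computes pvSpecF m
theorem pvGoA_eq (ind cols : Int) (board : List (List String))
    (H : ∀ a : Int, 0 ≤ a → a < cols →
      ∃ row cell, PySem.List.pyGet? board a = some row ∧ PySem.List.pyGet? row ind = some cell)
    (m : Nat) (hm : (m : Int) ≤ cols) :
    pvGoA ind cols board (PySem.List.pyRange (cols - m) cols 1)
      = (pvSpecF ind board m).map (fun a => [a, ind]) := by
  induction m with
  | zero => simp [pvGoA, pvSpecF]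
  | succ n ih =>
    rw [PySem.List.pyRange_one_cons (by push_cast; omega)]
    have hstep : cols - ((n:Nat)+1:Nat) + 1 = cols - (n:Nat) := by push_cast; omega
    rw [hstep]
    obtain ⟨row, cell, hrow, hcell⟩ := H (cols - 1 - (cols - ((n:Nat)+1:Nat)))
      (by push_cast; omega) (by push_cast; omega)
    have ha : cols - 1 - (cols - ((n:Nat)+1:Nat)) = (n : Int) := by push_cast; omega
    rw [ha] at hrow
    simp only [pvGoA, ha, hrow, hcell]
    have hq : pvQ ind board (n : Int) = (cell == "  -  ") := by
      simp [pvQ, hrow, hcell]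
    rcases hc : (cell == "  -  ") with _ | _
    · simp only [pvSpecF, hq, hc, if_neg Bool.false_ne_true]
      exact ih (by omega)
    · simp [pvSpecF, hq, hc]

-- B-side helper: max of a list with a strictly dominating last element
theorem pvMax_append (l : List Int) (x : Int) (h : ∀ y ∈ l, y ≤ x) :
    PySem.List.max? (l ++ [x]) (fun y => y) = some x := by
  cases l with
  | nil => simp [PySem.List.max?_id_cons]
  | cons a t =>
    have : (a :: t) ++ [x] = a :: (t ++ [x]) := rfl
    rw [this, PySem.List.max?_id_cons, List.foldl_append]
    have hfm := PySem.List.foldl_max_mem t a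
    have hle : t.foldl max a ≤ x := by
      rcases hfm with h1 | h1
      · rw [h1]; exact h a (by simp)
      · exact h _ (by simp [h1])
    simp [List.foldl, max_eq_right hle]

-- B-side: max of the filtered ascending range computes pvSpecF
theorem pvMax_eq (ind : Int) (board : List (List String)) (n : Nat) :
    PySem.List.max? ((PySem.List.pyRange 0 (n : Int) 1).filter (pvQ ind board)) (fun y => y)
      = pvSpecF ind board n := by
  induction n with
  | zero =>
    simp only [Nat.cast_zero]
    rw [PySem.List.pyRange_one_eq_nil (by omega : (0:Int) ≤ 0)]
    simp [pvSpecF, PySem.List.max?_eq_none_iff]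
  | succ n ih =>
    have hsplit : PySem.List.pyRange 0 (((n:Nat)+1:Nat) : Int) 1
        = PySem.List.pyRange 0 (n : Int) 1 ++ [(n : Int)] := by
      have : (((n:Nat)+1:Nat) : Int) = (n : Int) + 1 := by push_cast; ring
      rw [this]
      exact PySem.List.pyRange_one_succ_right (by omega)
    rw [hsplit, List.filter_append]
    rcases hq : pvQ ind board (n : Int) with _ | _
    · simp only [List.filter, hq]
      simp only [List.append_nil]
      rw [ih]
      simp [pvSpecF, hq]
    · simp only [List.filter, hq]
      rw [pvMax_append]
      · simp [pvSpecF, hq]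
      · intro y hy
        have := (PySem.List.mem_pyRange_one.mp (List.mem_of_mem_filter hy)).2
        omega


-- ===== VERDICT (by name: the statement is the Claim_ definition above) =====
theorem place_in_order_spec : Claim_equal_place_in_order := by
  intro choice coin_place cols board _ hpre
  obtain ⟨hlen, hrows⟩ := hpre
  unfold Spec_place_in_order place_in_order place_in_order_alt
  simp only []
  rw [show (fun r => ((PySem.List.pyGet? board r).bind
        (fun row => PySem.List.pyGet? row (coin_place - 1))) == some "  -  ")
      = pvQ (coin_place - 1) board from rfl]
  by_cases hc : 0 ≤ cols
  · have hcols : ((cols.toNat : Nat) : Int) = cols := by omega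
    have hAeq : pvGoA (coin_place - 1) cols board (PySem.List.pyRange 0 cols 1)
        = (pvSpecF (coin_place - 1) board cols.toNat).map (fun a => [a, coin_place - 1]) := by
      have h := pvGoA_eq (coin_place - 1) cols board
        (fun a h0 h1 => pvPre_lookup coin_place cols board hlen hrows a h0 h1)
        cols.toNat (by omega)
      rw [show cols - ((cols.toNat : Nat) : Int) = 0 by omega] at h
      exact h
    have hBeq : PySem.List.max?
        ((PySem.List.pyRange 0 cols 1).filter (pvQ (coin_place - 1) board)) (fun y => y)
        = pvSpecF (coin_place - 1) board cols.toNat := by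
      have h := pvMax_eq (coin_place - 1) board cols.toNat
      rw [hcols] at h
      exact h
    rw [hAeq, hBeq]
    cases pvSpecF (coin_place - 1) board cols.toNat <;> simp
  · rw [PySem.List.pyRange_one_eq_nil (by omega : cols ≤ (0:Int))]
    simp only [List.filter_nil]
    rw [show (PySem.List.max? ([] : List Int) (fun y => y)) = none from
      (PySem.List.max?_eq_none_iff _ _).mpr rfl]
    simp [pvGoA]
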